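-- pv_equiv track=rewrite | github.com/jsbueno/advent_of_code_2024 | day_07.py | process_operands
-- ===== SOURCE A (Python) =====
-- def process_operands(target, operands, part2=False):
--     if len(operands) == 1:
--         return {operands[0]}
--     results = set()
--     aux = str(operands[0])
--     for partial in process_operands(target, operands[1:]):
--         if (item:=operands[0] + partial) <= target:
--             results.add(item)
--         if (item:=operands[0] * partial) <= target:
--             results.add(item)
--         # if part2 and (item:=int(str(partial) +  )) <= target:
--         #    results.add(item)
--     return results
-- ===== SOURCE B (Python) =====
-- def _eval(target, operands, mask):
--     # value of the right-associative evaluation chosen by the bits of mask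
--     # (bit 0 = leftmost operator; 0 -> +, 1 -> *), or None if any
--     # intermediate result exceeds target (pruned).
--     if len(operands) == 1:
--         return operands[0]
--     v = _eval(target, operands[1:], mask // 2)
--     if v is None:
--         return None
--     v = operands[0] + v if mask % 2 == 0 else operands[0] * v
--     return v if v <= target else None
--
-- def process_operands(target, operands, part2=False):
--     # Enumerate all 2**(n-1) operator combinations instead of A's set DP.
--     results = set()
--     for mask in range(2 ** (len(operands) - 1)):
--         v = _eval(target, operands, mask)
--         if v is not None:
--             results.add(v)
--     return results
-- ===== Notes on version B (the rewrite author's own statement) =====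
-- stated objective: alternative
-- what changed: Replaced A's recursive reachable-set DP (a set of partial results per suffix) by direct enumeration of all 2**(n-1) operator bitmasks, evaluating each right-associative +/* combination with pruning and collecting the survivors into one set.
import Mathlib
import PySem

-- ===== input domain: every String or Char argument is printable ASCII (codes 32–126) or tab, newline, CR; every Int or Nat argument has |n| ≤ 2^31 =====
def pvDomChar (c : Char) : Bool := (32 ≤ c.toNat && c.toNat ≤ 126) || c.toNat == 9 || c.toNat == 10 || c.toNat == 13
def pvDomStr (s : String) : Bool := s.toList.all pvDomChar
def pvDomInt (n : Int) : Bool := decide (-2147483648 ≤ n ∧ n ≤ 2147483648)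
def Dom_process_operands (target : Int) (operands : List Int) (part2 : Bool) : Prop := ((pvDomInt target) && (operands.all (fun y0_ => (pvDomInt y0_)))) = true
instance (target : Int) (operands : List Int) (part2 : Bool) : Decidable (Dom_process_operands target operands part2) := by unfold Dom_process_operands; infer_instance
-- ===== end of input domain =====

-- B replaces A's recursive reachable-set DP by enumeration of all 2^(n-1)
-- operator bitmasks, evaluating each +/* combination with pruning (objective: alternative).

-- ===== PORT A =====
-- body of A's 'for partial in process_operands(...)' loop: conditional adds into 'results'
def poStepA (target op : Int) (partials : List Int) : List Int :=
  partials.foldl (fun results q =>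
    let results := if op + q ≤ target then PySem.Set.add results (op + q) else results
    if op * q ≤ target then PySem.Set.add results (op * q) else results)
    PySem.Set.empty

def process_operands (target : Int) (operands : List Int) (part2 : Bool) : List Int :=
  match operands with
  | [] => []  -- Python: operands[0] raises IndexError; excluded by Pre_
  | [x] => PySem.Set.add PySem.Set.empty x
  | x :: rest => poStepA target x (process_operands target rest false)

-- ===== PORT B =====
-- port of Source B's _eval: value of the mask-chosen right-associative evaluation, none = pruned
def pvEval (target : Int) (operands : List Int) (mask : Int) : Option Int :=
  match operands with
  | [] => none  -- unreachable: the Python helper is never called on [] (diverges there)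
  | x :: rest =>
    match rest with
    | [] => some x  -- len(operands) == 1
    | _ :: _ =>
      match pvEval target rest (PySem.Int.floordiv mask 2) with
      | none => none
      | some v =>
        let v := if PySem.Int.mod mask 2 == 0 then x + v else x * v
        if v ≤ target then some v else none

def process_operands_alt (target : Int) (operands : List Int) (part2 : Bool) : List Int :=
  (PySem.List.pyRange 0 ((2 : Int) ^ (operands.length - 1)) 1).foldl
    (fun results mask =>
      match pvEval target operands mask with
      | some v => PySem.Set.add results v
      | none => results)
    PySem.Set.empty

-- ===== PRECONDITION & SPEC =====
-- Pre_ excludes only the empty operand list, on which both Pythons raise (A: IndexError, B: TypeError).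
def Pre_process_operands (target : Int) (operands : List Int) (part2 : Bool) : Prop := operands ≠ []
instance (target : Int) (operands : List Int) (part2 : Bool) : Decidable (Pre_process_operands target operands part2) := by unfold Pre_process_operands; infer_instance
def pvWitness_process_operands : Int × List Int × Bool := (29, [2, 3, 5], false)
def Spec_process_operands (target : Int) (operands : List Int) (part2 : Bool) (out : List Int) : Prop := out = process_operands_alt target operands part2
instance (target : Int) (operands : List Int) (part2 : Bool) (out : List Int) : Decidable (Spec_process_operands target operands part2 out) := by unfold Spec_process_operands; infer_instance

-- ===== CLAIM (what is proved, stated in full; the proofs are below) =====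
def Claim_equal_process_operands : Prop := ∀ (target : Int) (operands : List Int) (part2 : Bool), Dom_process_operands target operands part2 → Pre_process_operands target operands part2 → Spec_process_operands target operands part2 (process_operands target operands part2)

-- ===== LEMMAS AND PROOFS =====

-- the two candidate values x produces from a partial result p, kept iff ≤ target
def poF (target x p : Int) : List Int :=
  (if x + p ≤ target then [x + p] else []) ++ (if x * p ≤ target then [x * p] else [])

-- the raw (duplicate-carrying) sequence of surviving evaluations, masks ascending
def poSeq (target : Int) (operands : List Int) : List Int :=
  (List.range (2 ^ (operands.length - 1))).filterMap (fun m : Nat => pvEval target operands (m : Int))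

theorem poSet_add_of_mem {s : List Int} {x : Int} (h : x ∈ s) : PySem.Set.add s x = s := by
  simp [PySem.Set.add, PySem.Set.contains, h]

theorem poSet_update_append (s xs ys : List Int) :
    PySem.Set.update s (xs ++ ys) = PySem.Set.update (PySem.Set.update s xs) ys := by
  simp [PySem.Set.update, List.foldl_append]

theorem poSet_mem_update_of_mem {s : List Int} (xs : List Int) {x : Int} (h : x ∈ s) :
    x ∈ PySem.Set.update s xs := by
  induction xs generalizing s with
  | nil => exact h
  | cons y ys ih =>
    have : x ∈ PySem.Set.add s y := by simp [PySem.Set.mem_add, h]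
    simpa [PySem.Set.update] using ih this

theorem poSet_mem_update_of_mem_arg {s xs : List Int} {x : Int} (h : x ∈ xs) :
    x ∈ PySem.Set.update s xs := by
  induction xs generalizing s with
  | nil => cases h
  | cons y ys ih =>
    cases h with
    | head => exact poSet_mem_update_of_mem ys (by simp [PySem.Set.mem_add])
    | tail _ h => simpa [PySem.Set.update] using ih (s := PySem.Set.add s y) h

theorem poSet_update_of_subset {s xs : List Int} (h : ∀ c ∈ xs, c ∈ s) :
    PySem.Set.update s xs = s := by
  induction xs with
  | nil => rfl
  | cons y ys ih =>
    have hy : PySem.Set.add s y = s := poSet_add_of_mem (h y (by simp))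
    have hstep : PySem.Set.update s (y :: ys) = PySem.Set.update (PySem.Set.add s y) ys := by
      simp [PySem.Set.update]
    rw [hstep, hy, ih (fun c hc => h c (by simp [hc]))]

theorem poSet_foldl_add_append (s l : List Int) : ∃ t, List.foldl PySem.Set.add s l = s ++ t := by
  induction l generalizing s with
  | nil => exact ⟨[], by simp⟩
  | cons x xs ih =>
    rcases ih (PySem.Set.add s x) with ⟨t, ht⟩
    by_cases hx : x ∈ s
    · exact ⟨t, by simpa [poSet_add_of_mem hx] using ht⟩
    · refine ⟨x :: t, ?_⟩
      have hadd : PySem.Set.add s x = s ++ [x] := by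
        simp [PySem.Set.add, PySem.Set.contains, hx]
      simp only [List.foldl, hadd] at ht ⊢
      simpa using ht

theorem poSub_flatMap {target x : Int} {seen s : List Int}
    (H : ∀ p ∈ seen, ∀ c ∈ poF target x p, c ∈ s) :
    PySem.Set.update s (seen.flatMap (poF target x)) = s := by
  apply poSet_update_of_subset
  intro c hc
  rcases List.mem_flatMap.mp hc with ⟨p, hp, hcp⟩
  exact H p hp c hcp

-- MAIN: updating with the candidates of A's deduplicated partials equals updating with the
-- raw candidate sequence, given the candidates of everything already 'seen' are in s
theorem poMain (target x : Int) (l : List Int) : ∀ (seen s : List Int),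
    (∀ p ∈ seen, ∀ c ∈ poF target x p, c ∈ s) →
    PySem.Set.update s ((List.foldl PySem.Set.add seen l).flatMap (poF target x))
      = PySem.Set.update s (l.flatMap (poF target x)) := by
  induction l with
  | nil =>
    intro seen s H
    simp only [List.foldl]
    rw [poSub_flatMap H, List.flatMap_nil]
    rfl
  | cons y l' ih =>
    intro seen s H
    rw [List.foldl_cons, List.flatMap_cons, poSet_update_append]
    by_cases hy : y ∈ seen
    · rw [poSet_add_of_mem hy, ih seen s H,
        poSet_update_of_subset (fun c hc => H y hy c hc)]
    · have hadd : PySem.Set.add seen y = seen ++ [y] := by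
        simp [PySem.Set.add, PySem.Set.contains, hy]
      rw [hadd]
      have H' : ∀ p ∈ seen ++ [y], ∀ c ∈ poF target x p,
          c ∈ PySem.Set.update s (poF target x y) := by
        intro p hp c hc
        rcases List.mem_append.mp hp with hp | hp
        · exact poSet_mem_update_of_mem _ (H p hp c hc)
        · simp only [List.mem_singleton] at hp; subst hp; exact poSet_mem_update_of_mem_arg hc
      rw [← ih (seen ++ [y]) (PySem.Set.update s (poF target x y)) H']
      rcases poSet_foldl_add_append (seen ++ [y]) l' with ⟨t, ht⟩
      have hflat : (List.foldl PySem.Set.add (seen ++ [y]) l').flatMap (poF target x)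
          = (seen.flatMap (poF target x) ++ poF target x y) ++ t.flatMap (poF target x) := by
        rw [ht]; simp [List.flatMap_append]
      have h1 : PySem.Set.update (PySem.Set.update s (poF target x y))
            (seen.flatMap (poF target x)) = PySem.Set.update s (poF target x y) := by
        apply poSet_update_of_subset
        intro c hc
        rcases List.mem_flatMap.mp hc with ⟨p, hp, hcp⟩
        exact poSet_mem_update_of_mem _ (H p hp c hcp)
      have h2 : PySem.Set.update (PySem.Set.update s (poF target x y))
            (poF target x y) = PySem.Set.update s (poF target x y) :=
        poSet_update_of_subset (fun c hc => poSet_mem_update_of_mem_arg hc)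
      rw [hflat]
      simp only [poSet_update_append]
      rw [poSub_flatMap H, h1, h2]

-- A's loop body over a list equals updating with the flatMapped candidates
theorem poStepA_eq_update (target x : Int) (l : List Int) (s : List Int) :
    l.foldl (fun results q =>
      let results := if x + q ≤ target then PySem.Set.add results (x + q) else results
      if x * q ≤ target then PySem.Set.add results (x * q) else results) s
    = PySem.Set.update s (l.flatMap (poF target x)) := by
  induction l generalizing s with
  | nil => rfl
  | cons q l' ih =>
    rw [List.foldl_cons, ih, List.flatMap_cons, poSet_update_append]
    congr 1
    unfold poF
    split_ifs <;> simp [PySem.Set.update]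

-- B's loop over masks equals updating with the filterMapped evaluations
theorem poStepB_eq_update (target : Int) (ops : List Int) (l : List Int) (s : List Int) :
    l.foldl (fun results mask =>
      match pvEval target ops mask with
      | some v => PySem.Set.add results v
      | none => results) s
    = PySem.Set.update s (l.filterMap (pvEval target ops)) := by
  induction l generalizing s with
  | nil => rfl
  | cons m l' ih =>
    rw [List.foldl_cons, ih]
    cases h : pvEval target ops m <;> simp [h, PySem.Set.update]

-- range(2k) filterMapped, grouped into consecutive pairs of masks
theorem poRange_pairs (g : Nat → Option Int) : ∀ (k : Nat),
    (List.range (2 * k)).filterMap g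
      = (List.range k).flatMap (fun m => (g (2 * m)).toList ++ (g (2 * m + 1)).toList) := by
  intro k
  induction k with
  | zero => rfl
  | succ k ih =>
    have h2 : 2 * (k + 1) = (2 * k + 1) + 1 := by ring
    rw [h2, List.range_succ, List.range_succ, List.range_succ]
    simp only [List.filterMap_append, List.flatMap_append, ih, List.flatMap_cons,
      List.flatMap_nil, List.filterMap_cons, List.filterMap_nil]
    cases g (2 * k) <;> cases g (2 * k + 1) <;> simp

theorem poFlatMap_filterMap (g : Nat → Option Int) (F : Int → List Int) (l : List Nat) :
    (l.filterMap g).flatMap F = l.flatMap (fun m => ((g m).toList).flatMap F) := by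
  induction l with
  | nil => rfl
  | cons a l ih => cases h : g a <;> simp [h, ih]

-- pvEval on x :: rest (rest nonempty) at even and odd masks
theorem pvEval_cons_even (target x : Int) (rest : List Int) (hrest : rest ≠ []) (m : Nat) :
    pvEval target (x :: rest) ((2 * m : Nat) : Int)
      = (pvEval target rest (m : Int)).bind (fun v =>
          if x + v ≤ target then some (x + v) else none) := by
  obtain ⟨y, rest', rfl⟩ := List.exists_cons_of_ne_nil hrest
  have hdiv : PySem.Int.floordiv ((2 * m : Nat) : Int) 2 = (m : Int) := by
    rw [PySem.Int.floordiv_eq_ediv_of_pos (by norm_num)]; omega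
  have hmod : PySem.Int.mod ((2 * m : Nat) : Int) 2 = 0 := by
    rw [PySem.Int.mod_eq_emod_of_pos (by norm_num)]; omega
  have hunf : pvEval target (x :: y :: rest') ((2 * m : Nat) : Int)
      = match pvEval target (y :: rest') (PySem.Int.floordiv ((2 * m : Nat) : Int) 2) with
        | none => none
        | some v =>
          let v := if PySem.Int.mod ((2 * m : Nat) : Int) 2 == 0 then x + v else x * v
          if v ≤ target then some v else none := rfl
  rw [hunf, hdiv, hmod]
  cases hv : pvEval target (y :: rest') (m : Int) <;> simp

theorem pvEval_cons_odd (target x : Int) (rest : List Int) (hrest : rest ≠ []) (m : Nat) :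
    pvEval target (x :: rest) ((2 * m + 1 : Nat) : Int)
      = (pvEval target rest (m : Int)).bind (fun v =>
          if x * v ≤ target then some (x * v) else none) := by
  obtain ⟨y, rest', rfl⟩ := List.exists_cons_of_ne_nil hrest
  have hdiv : PySem.Int.floordiv ((2 * m + 1 : Nat) : Int) 2 = (m : Int) := by
    rw [PySem.Int.floordiv_eq_ediv_of_pos (by norm_num)]; omega
  have hmod : PySem.Int.mod ((2 * m + 1 : Nat) : Int) 2 = 1 := by
    rw [PySem.Int.mod_eq_emod_of_pos (by norm_num)]; omega
  have hunf : pvEval target (x :: y :: rest') ((2 * m + 1 : Nat) : Int)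
      = match pvEval target (y :: rest') (PySem.Int.floordiv ((2 * m + 1 : Nat) : Int) 2) with
        | none => none
        | some v =>
          let v := if PySem.Int.mod ((2 * m + 1 : Nat) : Int) 2 == 0 then x + v else x * v
          if v ≤ target then some v else none := rfl
  rw [hunf, hdiv, hmod]
  cases hv : pvEval target (y :: rest') (m : Int) <;> simp

-- the raw-sequence recurrence: poSeq (x :: rest) = candidates flatMapped over poSeq rest
theorem poSeq_cons (target x : Int) (rest : List Int) (hrest : rest ≠ []) :
    poSeq target (x :: rest) = (poSeq target rest).flatMap (poF target x) := by
  unfold poSeq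
  have hlen : 2 ^ ((x :: rest).length - 1) = 2 * 2 ^ (rest.length - 1) := by
    cases rest with
    | nil => exact absurd rfl hrest
    | cons a b => simp [pow_succ]; ring
  rw [hlen, poRange_pairs, poFlatMap_filterMap]
  congr 1
  funext m
  rw [pvEval_cons_even target x rest hrest m, pvEval_cons_odd target x rest hrest m]
  cases hv : pvEval target rest (m : Int) with
  | none => simp
  | some v =>
    simp only [Option.bind_some, Option.toList_some, List.flatMap_cons, List.flatMap_nil]
    unfold poF
    split_ifs <;> simp

-- A's result is the first-occurrence dedup of the raw candidate sequence
theorem poA_eq (target : Int) : ∀ (ops : List Int), ops ≠ [] → ∀ (p2 : Bool),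
    process_operands target ops p2 = PySem.Set.ofList (poSeq target ops) := by
  intro ops
  induction ops with
  | nil => intro h; exact absurd rfl h
  | cons x rest ih =>
    intro _ p2
    cases rest with
    | nil =>
      have h1 : process_operands target [x] p2 = PySem.Set.add PySem.Set.empty x := rfl
      have h2 : poSeq target [x] = [x] := rfl
      rw [h1, h2]
      rfl
    | cons y rest' =>
      have hrest : (y :: rest') ≠ [] := by simp
      have hunf : process_operands target (x :: y :: rest') p2
          = poStepA target x (process_operands target (y :: rest') false) := rfl
      rw [hunf, poStepA, poStepA_eq_update, ih hrest false,
        poSeq_cons target x (y :: rest') hrest]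
      rw [PySem.Set.ofList_eq_foldl (poSeq target (y :: rest'))]
      rw [poMain target x (poSeq target (y :: rest')) [] PySem.Set.empty (by simp)]
      rfl

-- B's result is the same dedup
theorem poB_eq (target : Int) (ops : List Int) (p2 : Bool) :
    process_operands_alt target ops p2 = PySem.Set.ofList (poSeq target ops) := by
  unfold process_operands_alt
  rw [poStepB_eq_update, PySem.List.pyRange_one]
  have h1 : ((2 : Int) ^ (ops.length - 1) - 0).toNat = 2 ^ (ops.length - 1) := by
    rw [sub_zero, show (2 : Int) = ((2 : Nat) : Int) from rfl, ← Nat.cast_pow, Int.toNat_natCast]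
  rw [h1, List.filterMap_map]
  simp only [Function.comp, zero_add]
  unfold poSeq
  rw [PySem.Set.ofList_eq_foldl]
  rfl

-- ===== VERDICT (by name: the statement is the Claim_ definition above) =====
theorem process_operands_spec : Claim_equal_process_operands := by
  intro target ops p2 _hdom hpre
  unfold Spec_process_operands
  rw [poA_eq target ops hpre p2, poB_eq]
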